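-- pv_equiv track=rewrite | github.com/mnschmit/unsupervised-graph-text-conversion | src/analysis/ie_eval.py | generate_triple
-- ===== SOURCE A (Python) =====
-- from typing import List, Tuple, FrozenSet
--
-- def generate_triple(fact_buffer: List[str], sep: str) -> Tuple[str, str, str]:
--     triple_buffers = ([], [], [])
--     curr_buffer = 0
--     for elem in fact_buffer:
--         if elem == sep:
--             curr_buffer += 1
--             if curr_buffer > 2:
--                 break
--         else:
--             triple_buffers[curr_buffer].append(elem)
--
--     return tuple(" ".join(buf) for buf in triple_buffers)
-- ===== SOURCE B (Python) =====
-- def generate_triple(fact_buffer, sep):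
--     def cut(toks):
--         # split off the part before the first separator; rest is after it
--         try:
--             i = toks.index(sep)
--             return toks[:i], toks[i + 1:]
--         except ValueError:
--             return toks, []
--     subj, rest = cut(fact_buffer)
--     rel, rest = cut(rest)
--     obj, _ = cut(rest)
--     return (" ".join(subj), " ".join(rel), " ".join(obj))
-- ===== Notes on version B (the rewrite author's own statement) =====
-- stated objective: alternative
-- what changed: Replaces A's single-pass state machine (a mutable buffer index bumped on each separator, with a break after the third) by three successive split-at-first-separator steps, each done with list.index and slicing; tokens after the third separator are dropped because the third segment is cut at the next separator.
import Mathlib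
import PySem

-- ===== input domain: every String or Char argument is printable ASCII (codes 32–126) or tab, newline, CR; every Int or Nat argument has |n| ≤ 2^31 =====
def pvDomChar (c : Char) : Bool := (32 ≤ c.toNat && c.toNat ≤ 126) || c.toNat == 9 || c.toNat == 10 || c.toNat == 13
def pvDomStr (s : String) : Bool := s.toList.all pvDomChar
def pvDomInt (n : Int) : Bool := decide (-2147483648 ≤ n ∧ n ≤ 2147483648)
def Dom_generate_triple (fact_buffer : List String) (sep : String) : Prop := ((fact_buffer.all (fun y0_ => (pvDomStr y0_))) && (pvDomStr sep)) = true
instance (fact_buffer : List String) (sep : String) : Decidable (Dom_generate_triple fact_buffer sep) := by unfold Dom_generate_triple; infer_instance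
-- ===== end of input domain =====

-- B replaces A's one-pass state machine by three split-at-first-separator steps (same values; alternative decomposition).

-- ===== PORT A =====
-- triple_buffers[curr_buffer].append(elem)
def pvAppendAt (bufs : List String × List String × List String) (curr : Nat) (e : String) :
    List String × List String × List String :=
  match curr with
  | 0 => (bufs.1 ++ [e], bufs.2.1, bufs.2.2)
  | 1 => (bufs.1, bufs.2.1 ++ [e], bufs.2.2)
  | _ => (bufs.1, bufs.2.1, bufs.2.2 ++ [e])

-- the for-loop over fact_buffer, with the break once curr_buffer > 2
def pvLoopA (sep : String) : List String → Nat → (List String × List String × List String) →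
    (List String × List String × List String)
  | [], _, bufs => bufs
  | e :: rest, curr, bufs =>
    if e == sep then
      (if curr + 1 > 2 then bufs else pvLoopA sep rest (curr + 1) bufs)
    else pvLoopA sep rest curr (pvAppendAt bufs curr e)

def generate_triple (fact_buffer : List String) (sep : String) : String × String × String :=
  let bufs := pvLoopA sep fact_buffer 0 ([], [], [])
  (PySem.Str.join " " bufs.1, PySem.Str.join " " bufs.2.1, PySem.Str.join " " bufs.2.2)

-- ===== PORT B =====
-- cut(toks): toks.index(sep) + slices toks[:i], toks[i+1:]; (toks, []) when sep is absent.
-- take/drop are exact for these nonnegative in-range slice bounds.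
def pvCut (toks : List String) (sep : String) : List String × List String :=
  match PySem.List.index? toks sep with
  | some i => (toks.take i, toks.drop (i + 1))
  | none => (toks, [])

def generate_triple_alt (fact_buffer : List String) (sep : String) : String × String × String :=
  let p1 := pvCut fact_buffer sep
  let p2 := pvCut p1.2 sep
  let p3 := pvCut p2.2 sep
  (PySem.Str.join " " p1.1, PySem.Str.join " " p2.1, PySem.Str.join " " p3.1)

-- ===== PRECONDITION & SPEC =====
def Spec_generate_triple (fact_buffer : List String) (sep : String) (out : String × String × String) : Prop := out = generate_triple_alt fact_buffer sep
instance (fact_buffer : List String) (sep : String) (out : String × String × String) : Decidable (Spec_generate_triple fact_buffer sep out) := by unfold Spec_generate_triple; infer_instance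

-- ===== CLAIM (what is proved, stated in full; the proofs are below) =====
def Claim_equal_generate_triple : Prop := ∀ (fact_buffer : List String) (sep : String), Dom_generate_triple fact_buffer sep → Spec_generate_triple fact_buffer sep (generate_triple fact_buffer sep)

-- ===== LEMMAS AND PROOFS =====
theorem pvCut_nil (sep : String) : pvCut [] sep = ([], []) := by
  simp [pvCut, PySem.List.index?_eq_idxOf?]

theorem pvCut_cons (x : String) (xs : List String) (sep : String) :
    pvCut (x :: xs) sep =
      if x = sep then ([], xs)
      else ((x :: (pvCut xs sep).1), (pvCut xs sep).2) := by
  by_cases h : x = sep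
  · subst h
    rw [pvCut, PySem.List.index?_cons_self]
    simp
  · rw [pvCut, PySem.List.index?_cons_of_ne xs h]
    cases hi : List.idxOf? sep xs with
    | none => simp [pvCut, PySem.List.index?_eq_idxOf?, hi, h]
    | some i => simp [pvCut, PySem.List.index?_eq_idxOf?, hi, h, List.take_succ_cons]

theorem pvLoopA_two (sep : String) (xs : List String) (b1 b2 b3 : List String) :
    pvLoopA sep xs 2 (b1, b2, b3) = (b1, b2, b3 ++ (pvCut xs sep).1) := by
  induction xs generalizing b3 with
  | nil => simp [pvLoopA, pvCut_nil]
  | cons x xs ih =>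
    rw [pvCut_cons]
    by_cases h : x = sep
    · subst h; simp [pvLoopA]
    · simp only [pvLoopA, beq_iff_eq, h, pvAppendAt, ih]
      simp

theorem pvLoopA_one (sep : String) (xs : List String) (b1 b2 b3 : List String) :
    pvLoopA sep xs 1 (b1, b2, b3) =
      (b1, b2 ++ (pvCut xs sep).1, b3 ++ (pvCut (pvCut xs sep).2 sep).1) := by
  induction xs generalizing b2 with
  | nil => simp [pvLoopA, pvCut_nil]
  | cons x xs ih =>
    rw [pvCut_cons]
    by_cases h : x = sep
    · subst h; simp [pvLoopA, pvLoopA_two]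
    · simp only [pvLoopA, beq_iff_eq, h, pvAppendAt, ih]
      simp

theorem pvLoopA_zero (sep : String) (xs : List String) (b1 b2 b3 : List String) :
    pvLoopA sep xs 0 (b1, b2, b3) =
      (b1 ++ (pvCut xs sep).1,
       b2 ++ (pvCut (pvCut xs sep).2 sep).1,
       b3 ++ (pvCut (pvCut (pvCut xs sep).2 sep).2 sep).1) := by
  induction xs generalizing b1 with
  | nil => simp [pvLoopA, pvCut_nil]
  | cons x xs ih =>
    rw [pvCut_cons]
    by_cases h : x = sep
    · subst h; simp [pvLoopA, pvLoopA_one]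
    · simp only [pvLoopA, beq_iff_eq, h, pvAppendAt, ih]
      simp

-- ===== VERDICT (by name: the statement is the Claim_ definition above) =====
theorem generate_triple_spec : Claim_equal_generate_triple := by
  intro fb sep _
  unfold Spec_generate_triple generate_triple generate_triple_alt
  rw [pvLoopA_zero]
  simp
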